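-- pv_equiv track=rewrite | github.com/tiendm1991/python | leetcode/minimum-number-of-days-to-eat-n-oranges.py | minDays1
-- ===== SOURCE A (Python) =====
-- def minDays1(n: int) -> int:
--     dp = [0] * (n + 1)
--     if n == 1:
--         return 1
--     dp[1] = 1
--     for i in range(2, n + 1):
--         dp[i] = 1 + min(i % 3 + dp[i // 3], i % 2 + dp[i // 2])
--     return dp[n]
--     dp = {0: 0, 1: 1}
-- ===== SOURCE B (Python) =====
-- def minDays1(n: int) -> int:
--     if n <= 1:
--         return n
--     return 1 + min(n % 3 + minDays1(n // 3), n % 2 + minDays1(n // 2))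
-- ===== Notes on version B (the rewrite author's own statement) =====
-- stated objective: faster
-- what changed: Replaced the O(n) bottom-up dp table over all values 2..n by a top-down recursion that only visits the values reachable via n//2 and n//3, using the same recurrence.
import Mathlib
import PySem

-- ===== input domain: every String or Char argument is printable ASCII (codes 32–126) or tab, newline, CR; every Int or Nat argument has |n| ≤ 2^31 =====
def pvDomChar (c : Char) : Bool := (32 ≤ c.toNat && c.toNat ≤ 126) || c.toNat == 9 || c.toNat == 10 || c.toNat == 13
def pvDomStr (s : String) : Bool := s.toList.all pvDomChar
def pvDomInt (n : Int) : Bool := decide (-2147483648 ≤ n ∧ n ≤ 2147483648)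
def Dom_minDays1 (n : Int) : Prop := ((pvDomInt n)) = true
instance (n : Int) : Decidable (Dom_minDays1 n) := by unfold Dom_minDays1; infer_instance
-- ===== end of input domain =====

-- B replaces A's O(n) dp table over 2..n by a top-down recursion on n//2 and n//3 (same recurrence): faster.
-- Pre_ excludes n ≤ 0, where A raises IndexError (dp[1] on a list of length ≤ 1).

-- ===== PORT A =====
-- one dp update: dp[i] = 1 + min(i % 3 + dp[i // 3], i % 2 + dp[i // 2])
def pvStepA (dp : List Int) (i : Nat) : List Int :=
  dp.set i (1 + min (((i % 3 : Nat) : Int) + dp.getD (i / 3) 0)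
                    (((i % 2 : Nat) : Int) + dp.getD (i / 2) 0))

def minDays1 (n : Int) : Int :=
  if n = 1 then 1
  else
    -- dp = [0] * (n + 1); dp[1] = 1; for i in range(2, n + 1): …; return dp[n]
    let N := n.toNat
    let dp0 := (List.replicate (N + 1) (0 : Int)).set 1 1
    ((List.range' 2 (N - 1)).foldl pvStepA dp0).getD N 0

-- ===== PORT B =====
-- recursion on the Nat value (Source B recurses on the int; Pre_ keeps n ≥ 1, and the recursion only descends)
def pvF (m : Nat) : Int :=
  if m ≤ 1 then (m : Int)
  else 1 + min (((m % 3 : Nat) : Int) + pvF (m / 3)) (((m % 2 : Nat) : Int) + pvF (m / 2))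
decreasing_by
  · exact Nat.div_lt_self (by omega) (by omega)
  · exact Nat.div_lt_self (by omega) (by omega)

def minDays1_alt (n : Int) : Int :=
  if n ≤ 1 then n else pvF n.toNat

-- ===== PRECONDITION & SPEC =====
-- A raises IndexError for every n ≤ 0 (dp[1] = 1 on a list of length ≤ 1); Pre_ keeps exactly the returning inputs.
def Pre_minDays1 (n : Int) : Prop := 1 ≤ n
instance (n : Int) : Decidable (Pre_minDays1 n) := by unfold Pre_minDays1; infer_instance
def pvWitness_minDays1 : Int := 7

def Spec_minDays1 (n : Int) (out : Int) : Prop := out = minDays1_alt n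
instance (n : Int) (out : Int) : Decidable (Spec_minDays1 n out) := by unfold Spec_minDays1; infer_instance

-- ===== CLAIM (what is proved, stated in full; the proofs are below) =====
def Claim_equal_minDays1 : Prop := ∀ (n : Int), Dom_minDays1 n → Pre_minDays1 n → Spec_minDays1 n (minDays1 n)

-- ===== LEMMAS AND PROOFS =====

theorem pvF_le_one {m : Nat} (h : m ≤ 1) : pvF m = (m : Int) := by
  rw [pvF]; simp [h]

theorem pvF_ge_two {m : Nat} (h : 2 ≤ m) :
    pvF m = 1 + min (((m % 3 : Nat) : Int) + pvF (m / 3)) (((m % 2 : Nat) : Int) + pvF (m / 2)) := by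
  rw [pvF]; simp [show ¬ m ≤ 1 by omega]

theorem pvStepA_length (dp : List Int) (i : Nat) : (pvStepA dp i).length = dp.length := by
  simp [pvStepA]

theorem foldl_pvStepA_length (L : List Nat) (dp : List Int) :
    (L.foldl pvStepA dp).length = dp.length := by
  induction L generalizing dp with
  | nil => rfl
  | cons a L ih => simp [List.foldl_cons, ih, pvStepA_length]

-- loop invariant: after processing i = 2 .. m+1 the first m+2 entries of dp agree with pvF
theorem pvLoopInv (N m : Nat) (hN : 2 ≤ N) (hm : m ≤ N - 1) :
    ∀ j : Nat, j ≤ m + 1 →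
      ((List.range' 2 m).foldl pvStepA ((List.replicate (N + 1) (0 : Int)).set 1 1)).getD j 0
        = pvF j := by
  induction m with
  | zero =>
    intro j hj
    interval_cases j
    · simp [List.getD, pvF_le_one]
    · have h1 : 1 < (List.replicate (N + 1) (0 : Int)).length := by simp; omega
      simp [List.getD, List.getElem?_set_self h1, pvF_le_one]
  | succ m ih =>
    intro j hj
    have hm' : m ≤ N - 1 := by omega
    have ihm := ih hm'
    have hlen : ((List.range' 2 m).foldl pvStepA
        ((List.replicate (N + 1) (0 : Int)).set 1 1)).length = N + 1 := by
      rw [foldl_pvStepA_length]; simp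
    rw [show m + 1 = m + 1 * 1 from by omega, List.range'_concat, List.foldl_append]
    rw [show 2 + 1 * m = 2 + m from by omega]
    set dp := (List.range' 2 m).foldl pvStepA ((List.replicate (N + 1) (0 : Int)).set 1 1) with hdp
    simp only [List.foldl_cons, List.foldl_nil]
    have hidx : 2 + m < dp.length := by rw [hlen]; omega
    by_cases hje : j = 2 + m
    · subst hje
      rw [pvStepA, List.getD, List.getElem?_set_self hidx]
      have h3 : (2 + m) / 3 ≤ m + 1 := by omega
      have h2 : (2 + m) / 2 ≤ m + 1 := by omega
      simp only [Option.getD_some]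
      rw [ihm _ h3, ihm _ h2, pvF_ge_two (by omega : 2 ≤ 2 + m)]
    · have hne : 2 + m ≠ j := fun h => hje h.symm
      rw [pvStepA, List.getD, List.getElem?_set_ne hne, ← List.getD]
      exact ihm j (by omega)

theorem pvA_eq_pvF (n : Int) (hn : 2 ≤ n) : minDays1 n = pvF n.toNat := by
  have hne : n ≠ 1 := by omega
  have hN : 2 ≤ n.toNat := by omega
  simp only [minDays1, if_neg hne]
  exact pvLoopInv n.toNat (n.toNat - 1) hN (le_refl _) n.toNat (by omega)

-- ===== VERDICT (by name: the statement is the Claim_ definition above) =====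
theorem minDays1_spec : Claim_equal_minDays1 := by
  intro n _ hpre
  unfold Spec_minDays1 minDays1_alt
  by_cases h1 : n = 1
  · subst h1; simp [minDays1]
  · have h2 : 2 ≤ n := by unfold Pre_minDays1 at hpre; omega
    rw [if_neg (by omega : ¬ n ≤ 1), pvA_eq_pvF n h2]
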